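-- pv_equiv track=rewrite | github.com/beansthelightkeeper/QuantumOracle | The_OracleV12.py | get_factorization_chain
-- ===== SOURCE A (Python) =====
-- def get_factorization_chain(n: int) -> list[int]:
--     if n <= 0: return []
--     chain = {n}
--     current_num = n
--     for factor in [2, 3]:
--         while current_num % factor == 0:
--             current_num //= factor
--             if current_num > 1: chain.add(current_num)
--     i = 5
--     while i * i <= current_num:
--         for step in [i, i + 2]:
--              while current_num % step == 0:
--                 current_num //= step
--                 if current_num > 1: chain.add(current_num)
--         i += 6
--     if current_num > 1: chain.add(current_num)
--     return sorted(list(chain), reverse=True)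
-- ===== SOURCE B (Python) =====
-- def _spf(m):
--     d = 2
--     while d * d <= m:
--         if m % d == 0:
--             return d
--         d += 1
--     return m
--
--
-- def get_factorization_chain(n: int) -> list[int]:
--     if n <= 0:
--         return []
--     chain = {n}
--
--     def rec(m):
--         if m > 1:
--             chain.add(m)
--             rec(m // _spf(m))
--
--     rec(n)
--     return sorted(chain, reverse=True)
-- ===== Notes on version B (the rewrite author's own statement) =====
-- stated objective: alternative
-- what changed: A is one fused iterative sweep over wheel candidates carrying (current, chain) state across candidates; B is a recursion on the quotient chain itself: each element is produced from the previous one by an independent smallest-prime-factor search restarted from the bottom, with no candidate state carried between steps.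
import Mathlib
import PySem

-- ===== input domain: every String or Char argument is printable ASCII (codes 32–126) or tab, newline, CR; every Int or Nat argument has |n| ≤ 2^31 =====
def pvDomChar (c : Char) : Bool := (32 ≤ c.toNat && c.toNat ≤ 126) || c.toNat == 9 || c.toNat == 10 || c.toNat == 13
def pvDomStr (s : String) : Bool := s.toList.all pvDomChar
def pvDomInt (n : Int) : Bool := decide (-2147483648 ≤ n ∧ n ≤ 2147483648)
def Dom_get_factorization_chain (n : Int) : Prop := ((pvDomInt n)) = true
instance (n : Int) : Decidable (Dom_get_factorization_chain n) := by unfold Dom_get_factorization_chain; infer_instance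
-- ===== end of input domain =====

-- B replaces A's fused wheel-trial-division sweep by a recursion on the quotient chain
-- itself, each step independently recomputing the smallest prime factor from scratch;
-- objective: alternative decomposition, same results.
-- Loops/recursions are ported with a fuel parameter as a totality guard; the fuel chosen at
-- each call site always suffices (the proofs below go through the actual exits, never fuel 0).

-- ===== PORT A =====

-- inner 'while current_num % factor == 0' loop of A (fuel plus '2 ≤ factor ∧ 1 ≤ cur' are
-- totality guards only; they hold at every call A's code makes)
def pvDivLoopA : Nat → Int → Int → PySem.Set Int → Int × PySem.Set Int
  | 0, _, cur, chain => (cur, chain)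
  | fuel + 1, factor, cur, chain =>
    if 2 ≤ factor ∧ 1 ≤ cur ∧ PySem.Int.mod cur factor = 0 then
      pvDivLoopA fuel factor (PySem.Int.floordiv cur factor)
        (if 1 < PySem.Int.floordiv cur factor then
          PySem.Set.add chain (PySem.Int.floordiv cur factor) else chain)
    else (cur, chain)

-- outer 'while i * i <= current_num' wheel loop of A
def pvWheelA : Nat → Int → Int → PySem.Set Int → Int × PySem.Set Int
  | 0, _, cur, chain => (cur, chain)
  | fuel + 1, i, cur, chain =>
    if 5 ≤ i ∧ 1 ≤ cur ∧ i * i ≤ cur then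
      pvWheelA fuel (i + 6)
        (pvDivLoopA (pvDivLoopA cur.toNat i cur chain).1.toNat (i + 2)
          (pvDivLoopA cur.toNat i cur chain).1 (pvDivLoopA cur.toNat i cur chain).2).1
        (pvDivLoopA (pvDivLoopA cur.toNat i cur chain).1.toNat (i + 2)
          (pvDivLoopA cur.toNat i cur chain).1 (pvDivLoopA cur.toNat i cur chain).2).2
    else (cur, chain)

def get_factorization_chain (n : Int) : List Int :=
  if n ≤ 0 then []
  else
    let st0 : Int × PySem.Set Int := (n, PySem.Set.ofList [n])
    let st1 := [(2 : Int), 3].foldl (fun st factor => pvDivLoopA st.1.toNat factor st.1 st.2) st0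
    let st2 := pvWheelA (st1.1.toNat + 36) 5 st1.1 st1.2
    let chain := if 1 < st2.1 then PySem.Set.add st2.2 st2.1 else st2.2
    PySem.List.sorted chain (fun x => x) true

-- ===== PORT B =====

-- B's helper _spf: 'd = 2; while d*d <= m: if m % d == 0: return d; d += 1; return m'
-- (fuel plus '2 ≤ d ∧ 1 ≤ m' are totality guards only; they hold at every call B makes)
def pvSpf : Nat → Int → Int → Int
  | 0, _, m => m
  | fuel + 1, d, m =>
    if 2 ≤ d ∧ 1 ≤ m ∧ d * d ≤ m then
      (if PySem.Int.mod m d = 0 then d else pvSpf fuel (d + 1) m)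
    else m

-- B's 'def rec(m): if m > 1: chain.add(m); rec(m // _spf(m))', the mutated set passed as state
def pvRecB : Nat → Int → PySem.Set Int → PySem.Set Int
  | 0, _, acc => acc
  | fuel + 1, m, acc =>
    if 1 < m then
      pvRecB fuel (PySem.Int.floordiv m (pvSpf m.toNat 2 m)) (PySem.Set.add acc m)
    else acc

def get_factorization_chain_alt (n : Int) : List Int :=
  if n ≤ 0 then []
  else PySem.List.sorted (pvRecB n.toNat n (PySem.Set.ofList [n])) (fun x => x) true

-- ===== PRECONDITION & SPEC =====
def Spec_get_factorization_chain (n : Int) (out : List Int) : Prop := out = get_factorization_chain_alt n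
instance (n : Int) (out : List Int) : Decidable (Spec_get_factorization_chain n out) := by unfold Spec_get_factorization_chain; infer_instance

-- ===== CLAIM (what is proved, stated in full; the proofs are below) =====
def Claim_equal_get_factorization_chain : Prop := ∀ (n : Int), Dom_get_factorization_chain n → Spec_get_factorization_chain n (get_factorization_chain n)

-- ===== LEMMAS AND PROOFS =====

-- proof-side notions: the ascending prime factorization (as Ints), the invariant
-- 'm has no prime factor below c', the residual a trial-division loop leaves, the
-- quotient-collecting fold step both programs are reduced to, and a factor-extraction loop
def pvPfl (m : Int) : List Int := (Nat.primeFactorsList m.toNat).map (Nat.cast : Nat → Int)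

def pvInv (c m : Int) : Prop := ∀ p : Nat, p.Prime → (p : Int) ∣ m → c ≤ (p : Int)

def pvResid (r : Int) : List Int := if 1 < r then [r] else []

def pvChainStep (st : Int × PySem.Set Int) (f : Int) : Int × PySem.Set Int :=
  (PySem.Int.floordiv st.1 f,
   if 1 < PySem.Int.floordiv st.1 f then PySem.Set.add st.2 (PySem.Int.floordiv st.1 f) else st.2)

def pvFacExtract : Nat → Int → Int → List Int → List Int × Int
  | 0, _, m, acc => (acc, m)
  | fuel + 1, d, m, acc =>
    if 2 ≤ d ∧ 1 ≤ m ∧ PySem.Int.mod m d = 0 then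
      pvFacExtract fuel d (PySem.Int.floordiv m d) (acc ++ [d])
    else (acc, m)

theorem pvFd (m d : Int) (hm : 0 ≤ m) (hd : 0 < d) :
    PySem.Int.floordiv m d = ((m.toNat / d.toNat : Nat) : Int) := by
  conv_lhs => rw [← Int.toNat_of_nonneg hm, ← Int.toNat_of_nonneg hd.le]
  exact PySem.Int.floordiv_natCast m.toNat d.toNat

theorem pvFloordiv_toNat_lt (d m : Int) (hd : 2 ≤ d) (hm : 1 ≤ m) :
    (PySem.Int.floordiv m d).toNat < m.toNat := by
  rw [pvFd m d (by omega) (by omega), Int.toNat_natCast]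
  have := Nat.div_lt_self (show 0 < m.toNat by omega) (show 1 < d.toNat by omega)
  omega

theorem pv_pfl_cons_nat (M : Nat) (h : 2 ≤ M) :
    M.primeFactorsList = M.minFac :: (M / M.minFac).primeFactorsList := by
  obtain ⟨k, rfl⟩ : ∃ k, M = k + 2 := ⟨M - 2, by omega⟩
  exact Nat.primeFactorsList_add_two k

theorem pvSet_add_mem (s : PySem.Set Int) (x : Int) (h : x ∈ s) : PySem.Set.add s x = s := by
  simp [PySem.Set.add, PySem.Set.contains, h]

theorem pvSet_mem_add_self (s : PySem.Set Int) (x : Int) : x ∈ PySem.Set.add s x := by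
  by_cases h : x ∈ s <;> simp [PySem.Set.add, PySem.Set.contains, h]

theorem pvDvd_toNat (d m : Int) (hd : 0 ≤ d) (hm : 0 ≤ m) (h : d ∣ m) : d.toNat ∣ m.toNat := by
  have : (d.toNat : Int) ∣ (m.toNat : Int) := by
    rw [Int.toNat_of_nonneg hd, Int.toNat_of_nonneg hm]; exact h
  exact_mod_cast this

theorem pvPfl_cons (d m : Int) (hd : 2 ≤ d) (hm : 1 ≤ m) (hdvd : d ∣ m) (hinv : pvInv d m) :
    pvPfl m = d :: pvPfl (PySem.Int.floordiv m d) := by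
  have hDM : d.toNat ∣ m.toNat := pvDvd_toNat d m (by omega) (by omega) hdvd
  have hM : d.toNat ≤ m.toNat := Nat.le_of_dvd (by omega) hDM
  have hM2 : 2 ≤ m.toNat := by omega
  have hminle : m.toNat.minFac ≤ d.toNat := Nat.minFac_le_of_dvd (by omega) hDM
  have hminp : (m.toNat.minFac).Prime := Nat.minFac_prime (by omega)
  have hmindvd : (m.toNat.minFac : Int) ∣ m := by
    have : (m.toNat.minFac : Int) ∣ (m.toNat : Int) := Int.natCast_dvd_natCast.2 (Nat.minFac_dvd _)
    rwa [Int.toNat_of_nonneg (by omega : (0:Int) ≤ m)] at this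
  have hge : d ≤ (m.toNat.minFac : Int) := hinv _ hminp hmindvd
  have heq : m.toNat.minFac = d.toNat := by omega
  have hfd : PySem.Int.floordiv m d = ((m.toNat / d.toNat : Nat) : Int) := pvFd m d (by omega) (by omega)
  unfold pvPfl
  rw [hfd, Int.toNat_natCast, pv_pfl_cons_nat m.toNat hM2, heq, List.map_cons,
      Int.toNat_of_nonneg (by omega : (0:Int) ≤ d)]

theorem pvPfl_small (c m : Int) (hc : 2 ≤ c) (hm : 1 ≤ m) (hlt : m < c * c) (hinv : pvInv c m) :
    pvPfl m = pvResid m := by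
  by_cases h1 : m = 1
  · subst h1; simp [pvResid, pvPfl]
  · have hM2 : 2 ≤ m.toNat := by omega
    have hp : (m.toNat).Prime := by
      by_contra hnp
      have hsq := Nat.minFac_sq_le_self (show 0 < m.toNat by omega) hnp
      rw [pow_two] at hsq
      have hminp : (m.toNat.minFac).Prime := Nat.minFac_prime (by omega)
      have hmindvd : (m.toNat.minFac : Int) ∣ m := by
        have : (m.toNat.minFac : Int) ∣ (m.toNat : Int) := Int.natCast_dvd_natCast.2 (Nat.minFac_dvd _)
        rwa [Int.toNat_of_nonneg (by omega : (0:Int) ≤ m)] at this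
      have hge : c ≤ (m.toNat.minFac : Int) := hinv _ hminp hmindvd
      have h2 : (m.toNat.minFac : Int) * (m.toNat.minFac : Int) ≤ (m.toNat : Int) := by
        exact_mod_cast hsq
      have hm' : (m.toNat : Int) = m := Int.toNat_of_nonneg (by omega)
      nlinarith
    unfold pvPfl pvResid
    rw [Nat.primeFactorsList_prime hp, if_pos (show (1:Int) < m by omega), List.map_cons]
    simp [Int.toNat_of_nonneg (show (0:Int) ≤ m by omega)]

theorem pvInv_two (m : Int) : pvInv 2 m := fun _ hp _ => by exact_mod_cast hp.two_le

theorem pvInv_of_dvd (c m m' : Int) (h : pvInv c m) (hd : m' ∣ m) : pvInv c m' :=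
  fun p hp hpd => h p hp (hpd.trans hd)

theorem pvInv_succ_of_not_dvd (c m : Int) (h : pvInv c m) (hnd : ¬ c ∣ m) : pvInv (c + 1) m := by
  intro p hp hpd
  have hge := h p hp hpd
  rcases lt_or_eq_of_le hge with h2 | h2
  · omega
  · exact absurd (h2 ▸ hpd) hnd

theorem pvInv_succ_of_comp (c m : Int) (h : pvInv c m) (q : Int) (hq : 2 ≤ q) (hqc : q ∣ c)
    (hlt : q < c) : pvInv (c + 1) m := by
  intro p hp hpd
  have hge := h p hp hpd
  rcases lt_or_eq_of_le hge with h2 | h2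
  · omega
  · exfalso
    have hqp : q.toNat ∣ p := by
      have h4 : q ∣ (p : Int) := by rw [← h2]; exact hqc
      have : (q.toNat : Int) ∣ (p : Int) := by rwa [Int.toNat_of_nonneg (by omega)]
      exact_mod_cast this
    rcases hp.eq_one_or_self_of_dvd q.toNat hqp with h3 | h3
    · omega
    · have : (q.toNat : Int) = (p : Int) := by exact_mod_cast h3
      rw [Int.toNat_of_nonneg (by omega)] at this
      omega

theorem pvFacExtract_snd_bounds : ∀ (fuel : Nat) (d m : Int) (acc : List Int), 1 ≤ m →
    1 ≤ (pvFacExtract fuel d m acc).2 ∧ (pvFacExtract fuel d m acc).2 ≤ m := by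
  intro fuel
  induction fuel with
  | zero => intro d m acc hm; exact ⟨hm, le_refl m⟩
  | succ fuel ih =>
    intro d m acc hm
    by_cases h : 2 ≤ d ∧ 1 ≤ m ∧ PySem.Int.mod m d = 0
    · have hdd : d ∣ m := (PySem.Int.mod_eq_zero_iff_dvd m d).1 h.2.2
      have hDM : d.toNat ∣ m.toNat := pvDvd_toNat d m (by omega) (by omega) hdd
      have hle : d.toNat ≤ m.toNat := Nat.le_of_dvd (by omega) hDM
      have hfd : PySem.Int.floordiv m d = ((m.toNat / d.toNat : Nat) : Int) :=
        pvFd m d (by omega) (by omega)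
      have hm'1 : 1 ≤ PySem.Int.floordiv m d := by
        rw [hfd]
        have := (Nat.one_le_div_iff (show 0 < d.toNat by omega)).2 hle
        exact_mod_cast this
      have hlem : PySem.Int.floordiv m d ≤ m := by
        rw [hfd]
        have h2 : m.toNat / d.toNat ≤ m.toNat := Nat.div_le_self _ _
        omega
      simp only [pvFacExtract, if_pos h]
      have := ih d (PySem.Int.floordiv m d) (acc ++ [d]) hm'1
      exact ⟨this.1, this.2.trans hlem⟩
    · simp only [pvFacExtract, if_neg h]
      exact ⟨hm, le_refl m⟩

theorem pvFacExtract_acc : ∀ (fuel : Nat) (d m : Int) (acc : List Int),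
    pvFacExtract fuel d m acc =
      (acc ++ (pvFacExtract fuel d m []).1, (pvFacExtract fuel d m []).2) := by
  intro fuel
  induction fuel with
  | zero => intro d m acc; simp [pvFacExtract]
  | succ fuel ih =>
    intro d m acc
    by_cases h : 2 ≤ d ∧ 1 ≤ m ∧ PySem.Int.mod m d = 0
    · simp only [pvFacExtract, if_pos h]
      rw [ih d (PySem.Int.floordiv m d) (acc ++ [d]), ih d (PySem.Int.floordiv m d) ([] ++ [d])]
      simp
    · simp only [pvFacExtract, if_neg h]
      simp

theorem pvDivLoopA_fuse : ∀ (fuel : Nat) (d m : Int) (chain : PySem.Set Int),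
    pvDivLoopA fuel d m chain = (pvFacExtract fuel d m []).1.foldl pvChainStep (m, chain) ∧
    (pvDivLoopA fuel d m chain).1 = (pvFacExtract fuel d m []).2 := by
  intro fuel
  induction fuel with
  | zero => intro d m chain; simp [pvDivLoopA, pvFacExtract]
  | succ fuel ih =>
    intro d m chain
    by_cases h : 2 ≤ d ∧ 1 ≤ m ∧ PySem.Int.mod m d = 0
    · simp only [pvDivLoopA, pvFacExtract, if_pos h]
      rw [pvFacExtract_acc fuel d (PySem.Int.floordiv m d) ([] ++ [d])]
      obtain ⟨ih1, ih2⟩ := ih d (PySem.Int.floordiv m d)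
        (if 1 < PySem.Int.floordiv m d then
          PySem.Set.add chain (PySem.Int.floordiv m d) else chain)
      constructor
      · rw [ih1]
        simp [pvChainStep]
      · rw [ih2]
    · simp only [pvDivLoopA, pvFacExtract, if_neg h]
      simp

theorem pvExtract_spec : ∀ (fuel : Nat) (d m : Int), m.toNat ≤ fuel → 2 ≤ d → 1 ≤ m →
    pvInv d m →
    1 ≤ (pvFacExtract fuel d m []).2 ∧ ¬ d ∣ (pvFacExtract fuel d m []).2 ∧
    pvInv d (pvFacExtract fuel d m []).2 ∧
    pvPfl m = (pvFacExtract fuel d m []).1 ++ pvPfl (pvFacExtract fuel d m []).2 := by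
  intro fuel
  induction fuel with
  | zero => intro d m hf hd hm hinv; omega
  | succ fuel ih =>
    intro d m hf hd hm hinv
    by_cases hdvd : d ∣ m
    · have hmod : PySem.Int.mod m d = 0 := (PySem.Int.mod_eq_zero_iff_dvd m d).2 hdvd
      have h : 2 ≤ d ∧ 1 ≤ m ∧ PySem.Int.mod m d = 0 := ⟨hd, hm, hmod⟩
      have hfd : PySem.Int.floordiv m d = ((m.toNat / d.toNat : Nat) : Int) :=
        pvFd m d (by omega) (by omega)
      have hDM : d.toNat ∣ m.toNat := pvDvd_toNat d m (by omega) (by omega) hdvd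
      have hle : d.toNat ≤ m.toNat := Nat.le_of_dvd (by omega) hDM
      have hm'1 : 1 ≤ PySem.Int.floordiv m d := by
        rw [hfd]
        have := (Nat.one_le_div_iff (show 0 < d.toNat by omega)).2 hle
        exact_mod_cast this
      have hmm : PySem.Int.floordiv m d * d = m := by
        rw [hfd, ← Int.toNat_of_nonneg (show (0:Int) ≤ d by omega),
            ← Int.toNat_of_nonneg (show (0:Int) ≤ m by omega)]
        exact_mod_cast Nat.div_mul_cancel hDM
      have hinv' : pvInv d (PySem.Int.floordiv m d) :=
        pvInv_of_dvd d m _ hinv ⟨d, hmm.symm⟩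
      have hlt : (PySem.Int.floordiv m d).toNat ≤ fuel := by
        have := pvFloordiv_toNat_lt d m hd hm; omega
      obtain ⟨s1, s2, s3, s4⟩ := ih d (PySem.Int.floordiv m d) hlt hd hm'1 hinv'
      simp only [pvFacExtract, if_pos h]
      rw [pvFacExtract_acc fuel d (PySem.Int.floordiv m d) ([] ++ [d])]
      refine ⟨s1, s2, s3, ?_⟩
      rw [pvPfl_cons d m hd hm hdvd hinv, s4]
      simp
    · have hmod : ¬ (2 ≤ d ∧ 1 ≤ m ∧ PySem.Int.mod m d = 0) := by
        intro hc; exact hdvd ((PySem.Int.mod_eq_zero_iff_dvd m d).1 hc.2.2)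
      simp only [pvFacExtract, if_neg hmod]
      exact ⟨hm, hdvd, hinv, by simp⟩

theorem pvWheelA_spec : ∀ (fuel : Nat) (i m : Int) (chain : PySem.Set Int),
    (m + 36 - i).toNat ≤ fuel → 5 ≤ i → 1 ≤ m → i % 6 = 5 → pvInv i m →
    ∃ fs, pvWheelA fuel i m chain = fs.foldl pvChainStep (m, chain) ∧
      1 ≤ (pvWheelA fuel i m chain).1 ∧
      fs ++ pvResid (pvWheelA fuel i m chain).1 = pvPfl m := by
  intro fuel
  induction fuel with
  | zero =>
    intro i m chain hf hi hm hi6 hinv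
    refine ⟨[], by simp [pvWheelA], by simp [pvWheelA]; exact hm, ?_⟩
    simp only [pvWheelA, List.nil_append]
    have hii : i ≤ i * i := by nlinarith
    have hlt : m < i * i := by omega
    exact (pvPfl_small i m (by omega) hm hlt hinv).symm
  | succ fuel ih =>
    intro i m chain hf hi hm hi6 hinv
    by_cases hc : i * i ≤ m
    · have h : 5 ≤ i ∧ 1 ≤ m ∧ i * i ≤ m := ⟨hi, hm, hc⟩
      obtain ⟨f1, f1fst⟩ := pvDivLoopA_fuse m.toNat i m chain
      obtain ⟨s11, s12, s13, s14⟩ := pvExtract_spec m.toNat i m (le_refl _) (by omega) hm hinv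
      have hinv2 : pvInv (i + 2) (pvFacExtract m.toNat i m []).2 := by
        have h1 := pvInv_succ_of_not_dvd _ _ s13 s12
        have := pvInv_succ_of_comp (i + 1) _ h1 2 (by omega) (by omega) (by omega)
        simpa [add_assoc] using this
      obtain ⟨f2, f2fst⟩ := pvDivLoopA_fuse (pvFacExtract m.toNat i m []).2.toNat (i + 2)
        (pvFacExtract m.toNat i m []).2 (pvDivLoopA m.toNat i m chain).2
      obtain ⟨s21, s22, s23, s24⟩ := pvExtract_spec (pvFacExtract m.toNat i m []).2.toNat (i + 2)
        (pvFacExtract m.toNat i m []).2 (le_refl _) (by omega) s11 hinv2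
      have hinv6 : pvInv (i + 6) (pvFacExtract (pvFacExtract m.toNat i m []).2.toNat (i + 2)
          (pvFacExtract m.toNat i m []).2 []).2 := by
        have h3 := pvInv_succ_of_not_dvd _ _ s23 s22
        have h4 := pvInv_succ_of_comp (i + 2 + 1) _ h3 2 (by omega) (by omega) (by omega)
        have h5 := pvInv_succ_of_comp (i + 2 + 1 + 1) _ h4 3 (by omega) (by omega) (by omega)
        have h6 := pvInv_succ_of_comp (i + 2 + 1 + 1 + 1) _ h5 2 (by omega) (by omega) (by omega)
        have heq : i + 2 + 1 + 1 + 1 + 1 = i + 6 := by ring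
        rwa [heq] at h6
      have hb1 := pvFacExtract_snd_bounds m.toNat i m [] hm
      have hb2 := pvFacExtract_snd_bounds (pvFacExtract m.toNat i m []).2.toNat (i + 2)
        (pvFacExtract m.toNat i m []).2 [] s11
      have him : i ≤ m := by nlinarith
      have hf' : ((pvFacExtract (pvFacExtract m.toNat i m []).2.toNat (i + 2)
          (pvFacExtract m.toNat i m []).2 []).2 + 36 - (i + 6)).toNat ≤ fuel := by omega
      obtain ⟨fsW, w1, w2, w3⟩ := ih (i + 6)
        (pvFacExtract (pvFacExtract m.toNat i m []).2.toNat (i + 2)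
          (pvFacExtract m.toNat i m []).2 []).2
        (pvDivLoopA (pvFacExtract m.toNat i m []).2.toNat (i + 2)
          (pvFacExtract m.toNat i m []).2 (pvDivLoopA m.toNat i m chain).2).2
        hf' (by omega) s21 (by omega) hinv6
      have lW : pvWheelA (fuel + 1) i m chain = pvWheelA fuel (i + 6)
          (pvDivLoopA (pvDivLoopA m.toNat i m chain).1.toNat (i + 2)
            (pvDivLoopA m.toNat i m chain).1 (pvDivLoopA m.toNat i m chain).2).1
          (pvDivLoopA (pvDivLoopA m.toNat i m chain).1.toNat (i + 2)
            (pvDivLoopA m.toNat i m chain).1 (pvDivLoopA m.toNat i m chain).2).2 := by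
        simp only [pvWheelA, if_pos h]
      rw [f1fst] at lW
      rw [f2fst] at lW
      have hpair1 : ((pvFacExtract m.toNat i m []).2, (pvDivLoopA m.toNat i m chain).2) =
          pvDivLoopA m.toNat i m chain := by rw [← f1fst]
      have hpair2 : ((pvFacExtract (pvFacExtract m.toNat i m []).2.toNat (i + 2)
            (pvFacExtract m.toNat i m []).2 []).2,
          (pvDivLoopA (pvFacExtract m.toNat i m []).2.toNat (i + 2)
            (pvFacExtract m.toNat i m []).2 (pvDivLoopA m.toNat i m chain).2).2) =
          pvDivLoopA (pvFacExtract m.toNat i m []).2.toNat (i + 2)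
            (pvFacExtract m.toNat i m []).2 (pvDivLoopA m.toNat i m chain).2 := by
        rw [← f2fst]
      refine ⟨((pvFacExtract m.toNat i m []).1 ++
        (pvFacExtract (pvFacExtract m.toNat i m []).2.toNat (i + 2)
          (pvFacExtract m.toNat i m []).2 []).1) ++ fsW, ?_, ?_, ?_⟩
      · rw [lW, w1, hpair2, f2, hpair1, f1, List.foldl_append, List.foldl_append]
      · rw [lW]; exact w2
      · rw [lW, List.append_assoc, List.append_assoc, w3, ← s24, ← s14]
    · have lW : pvWheelA (fuel + 1) i m chain = (m, chain) := by
        simp only [pvWheelA, if_neg (show ¬ (5 ≤ i ∧ 1 ≤ m ∧ i * i ≤ m) by tauto)]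
      refine ⟨[], by rw [lW]; simp, by rw [lW]; exact hm, ?_⟩
      rw [lW]
      simp only [List.nil_append]
      exact (pvPfl_small i m (by omega) hm (by omega) hinv).symm

theorem pvFold_mem (fs : List Int) : ∀ (st : Int × PySem.Set Int), (1 < st.1 → st.1 ∈ st.2) →
    1 < (fs.foldl pvChainStep st).1 → (fs.foldl pvChainStep st).1 ∈ (fs.foldl pvChainStep st).2 := by
  induction fs with
  | nil => intro st h; exact h
  | cons f t iht =>
    intro st h
    simp only [List.foldl_cons]
    apply iht
    intro hgt
    simp only [pvChainStep] at hgt ⊢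
    rw [if_pos hgt]
    exact pvSet_mem_add_self _ _

theorem pvFinish_eq (st : Int × PySem.Set Int) (hmem : 1 < st.1 → st.1 ∈ st.2) (fs : List Int) :
    (if 1 < (fs.foldl pvChainStep st).1 then
       PySem.Set.add (fs.foldl pvChainStep st).2 (fs.foldl pvChainStep st).1
     else (fs.foldl pvChainStep st).2)
    = ((fs ++ pvResid ((fs.foldl pvChainStep st).1)).foldl pvChainStep st).2 := by
  by_cases hr : 1 < (fs.foldl pvChainStep st).1
  · rw [if_pos hr]
    unfold pvResid
    rw [if_pos hr, List.foldl_append]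
    simp only [List.foldl_cons, List.foldl_nil]
    have hdiv : PySem.Int.floordiv (fs.foldl pvChainStep st).1 (fs.foldl pvChainStep st).1 = 1 := by
      rw [PySem.Int.floordiv_eq_ediv_of_pos (by omega)]
      exact Int.ediv_self (by omega)
    simp only [pvChainStep, hdiv]
    rw [if_neg (by omega : ¬ (1:Int) < 1)]
    exact pvSet_add_mem _ _ (pvFold_mem fs st hmem hr)
  · rw [if_neg hr]
    unfold pvResid
    rw [if_neg hr]
    simp

-- B-side: _spf computes minFac, and the recursion is the fold over the prime factorization
theorem pvSpf_minFac : ∀ (fuel : Nat) (d m : Int), (m - d).toNat ≤ fuel → 2 ≤ d → 2 ≤ m →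
    d ≤ (m.toNat.minFac : Int) → pvSpf fuel d m = (m.toNat.minFac : Int) := by
  intro fuel
  induction fuel with
  | zero =>
    intro d m hf hd hm hdq
    have hql : m.toNat.minFac ≤ m.toNat := Nat.minFac_le (by omega)
    simp only [pvSpf]
    omega
  | succ fuel ih =>
    intro d m hf hd hm hdq
    have hql : m.toNat.minFac ≤ m.toNat := Nat.minFac_le (by omega)
    by_cases hc : d * d ≤ m
    · by_cases hdvd : PySem.Int.mod m d = 0
      · have hdd : d ∣ m := (PySem.Int.mod_eq_zero_iff_dvd m d).1 hdvd
        have hDM : d.toNat ∣ m.toNat := pvDvd_toNat d m (by omega) (by omega) hdd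
        have hle : m.toNat.minFac ≤ d.toNat := Nat.minFac_le_of_dvd (by omega) hDM
        simp only [pvSpf, if_pos (show 2 ≤ d ∧ 1 ≤ m ∧ d * d ≤ m by exact ⟨hd, by omega, hc⟩),
          if_pos hdvd]
        omega
      · have hne : d < (m.toNat.minFac : Int) := by
          rcases lt_or_eq_of_le hdq with h2 | h2
          · exact h2
          · exfalso
            apply hdvd
            apply (PySem.Int.mod_eq_zero_iff_dvd m d).2
            have : (m.toNat.minFac : Int) ∣ (m.toNat : Int) :=
              Int.natCast_dvd_natCast.2 (Nat.minFac_dvd _)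
            rw [← h2] at this
            rwa [Int.toNat_of_nonneg (by omega : (0:Int) ≤ m)] at this
        simp only [pvSpf, if_pos (show 2 ≤ d ∧ 1 ≤ m ∧ d * d ≤ m by exact ⟨hd, by omega, hc⟩),
          if_neg hdvd]
        exact ih (d + 1) m (by omega) (by omega) hm (by omega)
    · -- loop exits: m must be prime, so minFac = m
      have hp : (m.toNat).Prime := by
        by_contra hnp
        have hsq := Nat.minFac_sq_le_self (show 0 < m.toNat by omega) hnp
        rw [pow_two] at hsq
        have h2 : (m.toNat.minFac : Int) * (m.toNat.minFac : Int) ≤ (m.toNat : Int) := by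
          exact_mod_cast hsq
        have hm' : (m.toNat : Int) = m := Int.toNat_of_nonneg (by omega)
        nlinarith
      have : m.toNat.minFac = m.toNat := hp.minFac_eq
      simp only [pvSpf, if_neg (show ¬ (2 ≤ d ∧ 1 ≤ m ∧ d * d ≤ m) by tauto)]
      omega

theorem pvRecB_eq_fold : ∀ (fuel : Nat) (m : Int) (s : PySem.Set Int), m.toNat ≤ fuel → 1 ≤ m →
    pvRecB fuel m s =
      ((pvPfl m).foldl pvChainStep (m, if 1 < m then PySem.Set.add s m else s)).2 := by
  intro fuel
  induction fuel with
  | zero => intro m s hf hm; omega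
  | succ fuel ih =>
    intro m s hf hm
    by_cases h1 : 1 < m
    · have hM2 : 2 ≤ m.toNat := by omega
      have hqp : (m.toNat.minFac).Prime := Nat.minFac_prime (by omega)
      have hq2 : (2 : Int) ≤ (m.toNat.minFac : Int) := by exact_mod_cast hqp.two_le
      have hspf : pvSpf m.toNat 2 m = (m.toNat.minFac : Int) := by
        apply pvSpf_minFac m.toNat 2 m (by omega) (by omega) (by omega) hq2
      have hqdvd : (m.toNat.minFac : Int) ∣ m := by
        have : (m.toNat.minFac : Int) ∣ (m.toNat : Int) :=
          Int.natCast_dvd_natCast.2 (Nat.minFac_dvd _)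
        rwa [Int.toNat_of_nonneg (by omega : (0:Int) ≤ m)] at this
      have hinvq : pvInv (m.toNat.minFac : Int) m := by
        intro p hp hpd
        have : m.toNat.minFac ≤ p :=
          Nat.minFac_le_of_dvd hp.two_le (pvDvd_toNat p m (by omega) (by omega) hpd)
        exact_mod_cast this
      have hcons : pvPfl m = (m.toNat.minFac : Int) ::
          pvPfl (PySem.Int.floordiv m (m.toNat.minFac : Int)) :=
        pvPfl_cons _ m hq2 (by omega) hqdvd hinvq
      have hDM : (m.toNat.minFac : Int).toNat ∣ m.toNat :=
        pvDvd_toNat _ m (by omega) (by omega) hqdvd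
      have hled : (m.toNat.minFac : Int).toNat ≤ m.toNat := Nat.le_of_dvd (by omega) hDM
      have hfd : PySem.Int.floordiv m (m.toNat.minFac : Int) =
          ((m.toNat / (m.toNat.minFac : Int).toNat : Nat) : Int) :=
        pvFd m _ (by omega) (by omega)
      have hm'1 : 1 ≤ PySem.Int.floordiv m (m.toNat.minFac : Int) := by
        rw [hfd]
        have := (Nat.one_le_div_iff (show 0 < (m.toNat.minFac : Int).toNat by omega)).2 hled
        exact_mod_cast this
      have hlt : (PySem.Int.floordiv m (m.toNat.minFac : Int)).toNat ≤ fuel := by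
        have := pvFloordiv_toNat_lt (m.toNat.minFac : Int) m hq2 (by omega)
        omega
      have lB : pvRecB (fuel + 1) m s =
          pvRecB fuel (PySem.Int.floordiv m (pvSpf m.toNat 2 m)) (PySem.Set.add s m) := by
        simp only [pvRecB, if_pos h1]
      rw [lB, hspf, ih (PySem.Int.floordiv m (m.toNat.minFac : Int)) (PySem.Set.add s m) hlt hm'1]
      rw [if_pos h1, hcons]
      simp only [List.foldl_cons, pvChainStep]
    · have hm1 : m = 1 := by omega
      subst hm1
      simp [pvRecB, pvPfl]

theorem pv_main (n : Int) : get_factorization_chain n = get_factorization_chain_alt n := by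
  by_cases hn : n ≤ 0
  · unfold get_factorization_chain get_factorization_chain_alt
    rw [if_pos hn, if_pos hn]
  · have hn1 : 1 ≤ n := by omega
    -- A side: candidates 2, 3, then the wheel
    obtain ⟨f1, f1fst⟩ := pvDivLoopA_fuse n.toNat 2 n (PySem.Set.ofList [n])
    obtain ⟨s11, s12, s13, s14⟩ := pvExtract_spec n.toNat 2 n (le_refl _) (by omega) hn1 (pvInv_two n)
    have hinv3 : pvInv 3 (pvFacExtract n.toNat 2 n []).2 := by
      have := pvInv_succ_of_not_dvd _ _ s13 s12
      simpa using this
    obtain ⟨f2, f2fst⟩ := pvDivLoopA_fuse (pvFacExtract n.toNat 2 n []).2.toNat 3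
      (pvFacExtract n.toNat 2 n []).2 (pvDivLoopA n.toNat 2 n (PySem.Set.ofList [n])).2
    obtain ⟨s21, s22, s23, s24⟩ := pvExtract_spec (pvFacExtract n.toNat 2 n []).2.toNat 3
      (pvFacExtract n.toNat 2 n []).2 (le_refl _) (by omega) s11 hinv3
    have hinv5 : pvInv 5 (pvFacExtract (pvFacExtract n.toNat 2 n []).2.toNat 3
        (pvFacExtract n.toNat 2 n []).2 []).2 := by
      have h4 := pvInv_succ_of_not_dvd _ _ s23 s22
      have h5 := pvInv_succ_of_comp (3 + 1) _ h4 2 (by omega) (by omega) (by omega)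
      simpa using h5
    obtain ⟨fsW, w1, w2, w3⟩ := pvWheelA_spec
      ((pvFacExtract (pvFacExtract n.toNat 2 n []).2.toNat 3
        (pvFacExtract n.toNat 2 n []).2 []).2.toNat + 36) 5
      (pvFacExtract (pvFacExtract n.toNat 2 n []).2.toNat 3
        (pvFacExtract n.toNat 2 n []).2 []).2
      (pvDivLoopA (pvFacExtract n.toNat 2 n []).2.toNat 3
        (pvFacExtract n.toNat 2 n []).2 (pvDivLoopA n.toNat 2 n (PySem.Set.ofList [n])).2).2
      (by omega) (by omega) s21 (by norm_num) hinv5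
    -- normalize the A expression
    have hA : get_factorization_chain n = PySem.List.sorted
        (((((pvFacExtract n.toNat 2 n []).1 ++ (pvFacExtract (pvFacExtract n.toNat 2 n []).2.toNat 3
            (pvFacExtract n.toNat 2 n []).2 []).1) ++ fsW) ++
          pvResid ((((pvFacExtract n.toNat 2 n []).1 ++
            (pvFacExtract (pvFacExtract n.toNat 2 n []).2.toNat 3
              (pvFacExtract n.toNat 2 n []).2 []).1) ++
            fsW).foldl pvChainStep (n, PySem.Set.ofList [n])).1).foldl pvChainStep
          (n, PySem.Set.ofList [n])).2 (fun x => x) true := by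
      unfold get_factorization_chain
      rw [if_neg hn]
      simp only [List.foldl_cons, List.foldl_nil]
      have hpair1 : ((pvFacExtract n.toNat 2 n []).2,
          (pvDivLoopA n.toNat 2 n (PySem.Set.ofList [n])).2) =
          pvDivLoopA n.toNat 2 n (PySem.Set.ofList [n]) := by rw [← f1fst]
      have hpair2 : ((pvFacExtract (pvFacExtract n.toNat 2 n []).2.toNat 3
            (pvFacExtract n.toNat 2 n []).2 []).2,
          (pvDivLoopA (pvFacExtract n.toNat 2 n []).2.toNat 3
            (pvFacExtract n.toNat 2 n []).2 (pvDivLoopA n.toNat 2 n (PySem.Set.ofList [n])).2).2) =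
          pvDivLoopA (pvFacExtract n.toNat 2 n []).2.toNat 3
            (pvFacExtract n.toNat 2 n []).2 (pvDivLoopA n.toNat 2 n (PySem.Set.ofList [n])).2 := by
        rw [← f2fst]
      rw [f1fst, f2fst, w1, hpair2, f2, hpair1, f1]
      rw [← List.foldl_append, ← List.foldl_append]
      simp only [← List.append_assoc]
      congr 1
      exact pvFinish_eq (n, PySem.Set.ofList [n]) (fun _ => by simp [PySem.Set.ofList])
        (((pvFacExtract n.toNat 2 n []).1 ++ (pvFacExtract (pvFacExtract n.toNat 2 n []).2.toNat 3
          (pvFacExtract n.toNat 2 n []).2 []).1) ++ fsW)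
    -- the combined A factor list is the full prime factorization
    have hfsA : (((pvFacExtract n.toNat 2 n []).1 ++ (pvFacExtract (pvFacExtract n.toNat 2 n []).2.toNat 3
          (pvFacExtract n.toNat 2 n []).2 []).1) ++ fsW)
        ++ pvResid ((((pvFacExtract n.toNat 2 n []).1 ++
          (pvFacExtract (pvFacExtract n.toNat 2 n []).2.toNat 3
            (pvFacExtract n.toNat 2 n []).2 []).1) ++
          fsW).foldl pvChainStep (n, PySem.Set.ofList [n])).1 = pvPfl n := by
      have hr : ((((pvFacExtract n.toNat 2 n []).1 ++
          (pvFacExtract (pvFacExtract n.toNat 2 n []).2.toNat 3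
            (pvFacExtract n.toNat 2 n []).2 []).1) ++
          fsW).foldl pvChainStep (n, PySem.Set.ofList [n])).1 =
          (pvWheelA ((pvFacExtract (pvFacExtract n.toNat 2 n []).2.toNat 3
            (pvFacExtract n.toNat 2 n []).2 []).2.toNat + 36) 5
            (pvFacExtract (pvFacExtract n.toNat 2 n []).2.toNat 3
              (pvFacExtract n.toNat 2 n []).2 []).2
            (pvDivLoopA (pvFacExtract n.toNat 2 n []).2.toNat 3
              (pvFacExtract n.toNat 2 n []).2
              (pvDivLoopA n.toNat 2 n (PySem.Set.ofList [n])).2).2).1 := by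
        rw [w1]
        have hpair1 : ((pvFacExtract n.toNat 2 n []).2,
            (pvDivLoopA n.toNat 2 n (PySem.Set.ofList [n])).2) =
            pvDivLoopA n.toNat 2 n (PySem.Set.ofList [n]) := by rw [← f1fst]
        have hpair2 : ((pvFacExtract (pvFacExtract n.toNat 2 n []).2.toNat 3
              (pvFacExtract n.toNat 2 n []).2 []).2,
            (pvDivLoopA (pvFacExtract n.toNat 2 n []).2.toNat 3
              (pvFacExtract n.toNat 2 n []).2
              (pvDivLoopA n.toNat 2 n (PySem.Set.ofList [n])).2).2) =
            pvDivLoopA (pvFacExtract n.toNat 2 n []).2.toNat 3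
              (pvFacExtract n.toNat 2 n []).2
              (pvDivLoopA n.toNat 2 n (PySem.Set.ofList [n])).2 := by
          rw [← f2fst]
        rw [hpair2, f2, hpair1, f1, ← List.foldl_append, ← List.foldl_append,
          List.append_assoc]
      rw [hr, List.append_assoc, List.append_assoc, w3, ← s24, ← s14]
    rw [hA, hfsA]
    -- B side: unfold the recursion to the same fold over the prime factorization
    unfold get_factorization_chain_alt
    rw [if_neg hn]
    rw [pvRecB_eq_fold n.toNat n (PySem.Set.ofList [n]) (le_refl _) hn1]
    congr 2
    by_cases h1 : 1 < n
    · rw [if_pos h1, pvSet_add_mem _ _ (by simp [PySem.Set.ofList])]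
    · rw [if_neg h1]

-- ===== VERDICT (by name: the statement is the Claim_ definition above) =====
theorem get_factorization_chain_spec : Claim_equal_get_factorization_chain := by
  intro n _
  unfold Spec_get_factorization_chain
  exact pv_main n
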